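-- pv_equiv track=rewrite | github.com/Real-Fruit-Snacks/mainsail | mainsail/applets/sed.py | _bre_to_python
-- ===== SOURCE A (Python) =====
-- _BRE_SWAP = set("(){}+?|")
--
-- def _bre_to_python(pattern: str) -> str:
--     """Translate basic-regex (escaped metas) to Python's extended regex."""
--     out: list[str] = []
--     i = 0
--     while i < len(pattern):
--         c = pattern[i]
--         if c == "\\" and i + 1 < len(pattern):
--             nxt = pattern[i + 1]
--             if nxt in _BRE_SWAP:
--                 out.append(nxt)  # BRE \( becomes Python (
--                 i += 2
--                 continue
--             out.append(c + nxt)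
--             i += 2
--             continue
--         if c in _BRE_SWAP:
--             out.append("\\" + c)  # BRE bare ( is literal
--             i += 1
--             continue
--         out.append(c)
--         i += 1
--     return "".join(out)
-- ===== SOURCE B (Python) =====
-- import re
--
-- _BRE_SWAP = set("(){}+?|")
--
-- def _bre_to_python(pattern: str) -> str:
--     """Translate basic-regex (escaped metas) to Python's extended regex."""
--     def repl(m):
--         esc = m.group(1)
--         if esc is not None:
--             return esc if esc in _BRE_SWAP else "\\" + esc
--         bare = m.group(2)
--         return "\\" + bare if bare in _BRE_SWAP else bare
--     return re.sub(r"\\(.)|(.)", repl, pattern)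
-- ===== Notes on version B (the rewrite author's own statement) =====
-- stated objective: idiomatic
-- what changed: Replaced the manual index-advancing while loop and list accumulator with a single re.sub over the pattern using r'\\(.)|(.)' and a replacement callback, letting the regex engine do the two-character tokenization.
import Mathlib
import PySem

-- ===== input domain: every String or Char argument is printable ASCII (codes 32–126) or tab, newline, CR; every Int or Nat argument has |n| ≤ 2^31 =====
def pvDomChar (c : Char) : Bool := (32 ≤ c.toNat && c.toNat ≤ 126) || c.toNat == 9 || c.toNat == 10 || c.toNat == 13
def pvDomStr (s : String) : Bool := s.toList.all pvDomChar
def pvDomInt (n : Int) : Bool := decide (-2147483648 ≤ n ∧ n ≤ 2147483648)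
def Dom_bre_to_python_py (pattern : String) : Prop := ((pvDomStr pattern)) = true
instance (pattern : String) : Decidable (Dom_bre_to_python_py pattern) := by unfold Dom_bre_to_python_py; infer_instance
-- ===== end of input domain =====

-- B replaces A's manual index-advancing while loop with a single re.sub tokenization pass (idiomatic; same cost).

-- ===== PORT A =====
-- _BRE_SWAP = set("(){}+?|")
def breSwap : List Char := PySem.Set.ofList ['(', ')', '{', '}', '+', '?', '|']

-- A's while loop over indices i, advancing by 1 or 2; since i only moves forward,
-- it is transcribed as recursion on the remaining characters with the same branch order,
-- accumulating the `out` list of appended strings (as List Char pieces), joined at the end.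
def breLoopA : List Char → List (List Char) → List (List Char)
  | [], out => out.reverse
  | c :: rest, out =>
    if c = '\\' ∧ rest ≠ [] then            -- c == "\\" and i + 1 < len(pattern)
      match rest with
      | nxt :: rest' =>
        if nxt ∈ breSwap then
          breLoopA rest' ([nxt] :: out)      -- out.append(nxt); i += 2
        else
          breLoopA rest' ([c, nxt] :: out)   -- out.append(c + nxt); i += 2
      | [] => out.reverse                    -- unreachable (rest ≠ [])
    else if c ∈ breSwap then
      breLoopA rest (['\\', c] :: out)       -- out.append("\\" + c); i += 1
    else
      breLoopA rest ([c] :: out)             -- out.append(c); i += 1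

def bre_to_python_py (pattern : String) : String :=
  String.ofList (breLoopA pattern.toList []).flatten   -- "".join(out)

-- ===== PORT B =====
-- the replacement callback of B's re.sub
def breRepl (escaped : Bool) (c : Char) : List Char :=
  if escaped then
    if c ∈ breSwap then [c] else ['\\', c]         -- group(1) matched
  else
    if c ∈ breSwap then ['\\', c] else [c]         -- group(2) matched

-- Hand port of re.sub(r"\\(.)|(.)", repl, pattern): exact for this fixed regex.
-- At each position the engine tries the first alternative '\\(.)' (a backslash followed by
-- any char except '\n', since '.' excludes newline), then '(.)' (any char except '\n');
-- a character no alternative matches (a '\n' alone, or after an unconsumed '\\') is copied verbatim.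
def breScanB : List Char → List Char
  | [] => []
  | '\\' :: nxt :: rest =>
    if nxt ≠ '\n' then breRepl true nxt ++ breScanB rest                 -- \\(.) matched
    else breRepl false '\\' ++ breScanB (nxt :: rest)                    -- (.) matched just '\\'
  | c :: rest =>
    if c ≠ '\n' then breRepl false c ++ breScanB rest                    -- (.) matched
    else c :: breScanB rest                                              -- unmatched: copied verbatim

def bre_to_python_py_alt (pattern : String) : String :=
  String.ofList (breScanB pattern.toList)

-- ===== PRECONDITION & SPEC =====
def Spec_bre_to_python_py (pattern : String) (out : String) : Prop := out = bre_to_python_py_alt pattern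
instance (pattern : String) (out : String) : Decidable (Spec_bre_to_python_py pattern out) := by unfold Spec_bre_to_python_py; infer_instance

-- ===== CLAIM (what is proved, stated in full; the proofs are below) =====
def Claim_equal_bre_to_python_py : Prop := ∀ (pattern : String), Dom_bre_to_python_py pattern → Spec_bre_to_python_py pattern (bre_to_python_py pattern)

-- ===== LEMMAS AND PROOFS =====

theorem breLoopA_flatten (l : List Char) (out : List (List Char)) :
    (breLoopA l out).flatten = out.reverse.flatten ++ breScanB l := by
  fun_induction breLoopA l out with
  | case1 out => simp [breScanB]
  | case2 c out nxt rest' hmem h ih =>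
      obtain ⟨hc, -⟩ := h; subst hc
      rw [ih]
      have hn : nxt ≠ '\n' := by rintro rfl; exact absurd hmem (by decide)
      simp [breScanB, hn, breRepl, hmem]
  | case3 c out nxt rest' hmem h ih =>
      obtain ⟨hc, -⟩ := h; subst hc
      rw [ih]
      by_cases hn : nxt = '\n'
      · subst hn
        simp [breScanB, breRepl, (by decide : ¬ ('\\' ∈ breSwap))]
      · simp [breScanB, hn, breRepl, hmem]
  | case4 c out h => exact absurd h.2 (by simp)
  | case5 c rest out hneg hmem ih =>
      rw [ih]
      have hc : c ≠ '\\' := by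
        rintro rfl
        rcases rest with _ | ⟨x, xs⟩
        · exact absurd hmem (by decide)
        · exact hneg ⟨rfl, by simp⟩
      have hn : c ≠ '\n' := by rintro rfl; exact absurd hmem (by decide)
      rcases rest with _ | ⟨x, xs⟩ <;> simp [breScanB, hc, hn, breRepl, hmem]
  | case6 c rest out hneg hmem ih =>
      rw [ih]
      by_cases hc : c = '\\'
      · subst hc
        have hrest : rest = [] := by
          rcases rest with _ | ⟨x, xs⟩
          · rfl
          · exact absurd ⟨rfl, by simp⟩ hneg
        subst hrest
        simp [breScanB, breRepl, hmem]
      · by_cases hn : c = '\n'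
        · subst hn; rcases rest with _ | ⟨x, xs⟩ <;> simp [breScanB]
        · rcases rest with _ | ⟨x, xs⟩ <;> simp [breScanB, hc, hn, breRepl, hmem]

-- ===== VERDICT (by name: the statement is the Claim_ definition above) =====
theorem bre_to_python_py_spec : Claim_equal_bre_to_python_py := by
  intro pattern _
  unfold Spec_bre_to_python_py bre_to_python_py bre_to_python_py_alt
  rw [breLoopA_flatten]
  simp
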